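-- pv_equiv track=rewrite | github.com/abi-commits/rare-disease-diagnosis | src/components/parse_hpo_obo.py | parse_term_block
-- ===== SOURCE A (Python) =====
-- from typing import Dict, List, Optional, Iterator
--
-- def parse_tag_value(line: str) -> tuple[str, str]:
--     """Parse a line into tag and value, handling potential colons in the value."""
--     if ': ' not in line:
--         return line, ''
--     tag, value = line.split(': ', 1)
--     return tag.strip(), value.strip()
--
-- def parse_term_block(lines: List[str]) -> Optional[Dict[str, List[str]]]:
--     """Parse a Term block into a dictionary of tag-value pairs.
--     Some tags (like synonym, xref) can appear multiple times, so values are lists."""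
--     if not lines or not lines[0].startswith('[Term]'):
--         return None
--
--     term = {}
--     current_tag = None
--
--     for line in lines[1:]:  # Skip [Term] line
--         if not line.strip():
--             continue
--
--         # Handle line continuations (indented lines)
--         if line.startswith(' '):
--             if current_tag and current_tag in term:
--                 term[current_tag][-1] += ' ' + line.strip()
--             continue
--
--         tag, value = parse_tag_value(line)
--         current_tag = tag
--
--         if not value:
--             continue
--
--         # Some fields can appear multiple times, store as lists
--         if tag in ['synonym', 'xref', 'alt_id', 'is_a', 'intersection_of', 'disjoint_from']:
--             if tag not in term:
--                 term[tag] = []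
--             term[tag].append(value)
--         else:
--             # Single-value fields
--             term[tag] = [value]
--
--     return term
-- ===== SOURCE B (Python) =====
-- def parse_term_block(lines):
--     """Two-pass re-implementation: first collect stored (tag, value) records
--     (merging indented continuation lines into the right record), then fold the
--     records into the tag -> values dict."""
--     if not lines or not lines[0].startswith('[Term]'):
--         return None
--     MULTI = ('synonym', 'xref', 'alt_id', 'is_a', 'intersection_of', 'disjoint_from')
--     records = []   # stored records in order: [tag, value]
--     last_idx = {}  # tag -> index in records of its most recent stored record
--     cur = ''       # tag of the most recent tag line ('' = none yet / empty tag)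
--     for line in lines[1:]:
--         s = line.strip()
--         if not s:
--             continue
--         if line.startswith(' '):
--             if cur and cur in last_idx:
--                 records[last_idx[cur]][1] += ' ' + s
--             continue
--         if ': ' in line:
--             tag, val = line.split(': ', 1)
--             tag, val = tag.strip(), val.strip()
--         else:
--             tag, val = line, ''
--         cur = tag
--         if val:
--             last_idx[tag] = len(records)
--             records.append([tag, val])
--     term = {}
--     for tag, val in records:
--         if tag in MULTI:
--             term.setdefault(tag, []).append(val)
--         else:
--             term[tag] = [val]
--     return term
-- ===== Notes on version B (the rewrite author's own statement) =====
-- stated objective: alternative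
-- what changed: Single-pass dict mutation with in-place last-element updates is replaced by a two-pass design: first collect an ordered list of stored (tag, value) records (merging indented continuation lines into the record addressed by a tag->last-record index), then fold the record list into the tag->values dict.
import Mathlib
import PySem

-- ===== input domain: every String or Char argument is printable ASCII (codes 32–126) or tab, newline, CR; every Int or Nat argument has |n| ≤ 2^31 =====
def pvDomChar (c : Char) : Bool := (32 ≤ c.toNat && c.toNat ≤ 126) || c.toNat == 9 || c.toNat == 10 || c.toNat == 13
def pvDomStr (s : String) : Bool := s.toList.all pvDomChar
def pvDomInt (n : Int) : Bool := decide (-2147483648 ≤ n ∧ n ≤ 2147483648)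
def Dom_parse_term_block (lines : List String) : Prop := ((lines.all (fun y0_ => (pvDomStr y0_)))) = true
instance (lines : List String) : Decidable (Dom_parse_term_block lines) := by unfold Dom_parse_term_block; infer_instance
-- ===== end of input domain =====

-- B replaces A's single-pass dict mutation with a two-pass design (collect stored (tag, value)
-- records with a last-record index, then fold them into the dict); alternative structure, same cost.



-- ===== PORT A =====
-- Both ports return the dict as its insertion-ordered items list.
-- multi-value tags of A ('synonym', 'xref', …)
def pvMulti : List String := ["synonym", "xref", "alt_id", "is_a", "intersection_of", "disjoint_from"]

-- A's parse_tag_value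
def parse_tag_value (line : String) : String × String :=
  if PySem.Str.isIn ": " line = false then (line, "")
  else
    match PySem.Str.splitMax? line ": " 1 with
    | some (tag :: value :: _) => (PySem.Str.strip tag, PySem.Str.strip value)
    | _ => (line, "")   -- unreachable: ': ' occurs in line, so the split yields two parts

-- term[current_tag][-1] += x  (the list is never empty when A reaches this line)
def pvModLast (x : String) (l : List String) : List String :=
  l.dropLast ++ [(l.getLast?.getD "") ++ x]

-- A's loop body: state is (term, current_tag)
def pvStepA (st : PySem.Dict String (List String) × Option String) (line : String) :
    PySem.Dict String (List String) × Option String :=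
  if PySem.Str.strip line = "" then st
  else if PySem.Str.startswith line " " then
    match st.2 with
    | some t =>
        if t ≠ "" ∧ st.1.contains t = true then
          (st.1.modify t [] (pvModLast (" " ++ PySem.Str.strip line)), st.2)
        else st
    | none => st
  else
    let tv := parse_tag_value line
    if tv.2 = "" then (st.1, some tv.1)
    else if pvMulti.contains tv.1 then
      let d := if st.1.contains tv.1 then st.1 else st.1.insert tv.1 []
      (d.modify tv.1 [] (fun l => l ++ [tv.2]), some tv.1)
    else (st.1.insert tv.1 [tv.2], some tv.1)

def parse_term_block (lines : List String) : Option (List (String × List String)) :=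
  match lines with
  | [] => none
  | first :: rest =>
    if PySem.Str.startswith first "[Term]" then
      some ((rest.foldl pvStepA (PySem.Dict.empty, none)).1).items
    else none

-- ===== PORT B =====
-- B's first pass collects stored (tag, value) records; state is (records, last_idx, cur)
def pvStepB (st : List (String × String) × PySem.Dict String Nat × String) (line : String) :
    List (String × String) × PySem.Dict String Nat × String :=
  let s := PySem.Str.strip line
  if s = "" then st
  else if PySem.Str.startswith line " " then
    if st.2.2 ≠ "" ∧ st.2.1.contains st.2.2 = true then
      match st.2.1.get? st.2.2 with
      | some i =>
          let r := st.1.getD i ("", "")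
          (st.1.set i (r.1, r.2 ++ " " ++ s), st.2.1, st.2.2)
      | none => st   -- unreachable: cur ∈ last_idx was just checked
    else st
  else
    let tv :=
      if PySem.Str.isIn ": " line = false then (line, "")
      else
        match PySem.Str.splitMax? line ": " 1 with
        | some (tag :: value :: _) => (PySem.Str.strip tag, PySem.Str.strip value)
        | _ => (line, "")   -- unreachable
    if tv.2 = "" then (st.1, st.2.1, tv.1)
    else (st.1 ++ [(tv.1, tv.2)], st.2.1.insert tv.1 st.1.length, tv.1)

-- B's second pass: fold a (tag, value) record into the dict
def pvStepSP (d : PySem.Dict String (List String)) (r : String × String) :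
    PySem.Dict String (List String) :=
  if pvMulti.contains r.1 then (d.setdefault r.1 []).modify r.1 [] (fun l => l ++ [r.2])
  else d.insert r.1 [r.2]

def parse_term_block_alt (lines : List String) : Option (List (String × List String)) :=
  match lines with
  | [] => none
  | first :: rest =>
    if PySem.Str.startswith first "[Term]" then
      let records := (rest.foldl pvStepB ([], PySem.Dict.empty, "")).1
      some (records.foldl pvStepSP PySem.Dict.empty).items
    else none

-- ===== PRECONDITION & SPEC =====
def Spec_parse_term_block (lines : List String) (out : Option (List (String × List String))) : Prop := out = parse_term_block_alt lines
instance (lines : List String) (out : Option (List (String × List String))) : Decidable (Spec_parse_term_block lines out) := by unfold Spec_parse_term_block; infer_instance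

-- ===== CLAIM (what is proved, stated in full; the proofs are below) =====
def Claim_equal_parse_term_block : Prop := ∀ (lines : List String), Dom_parse_term_block lines → Spec_parse_term_block lines (parse_term_block lines)

-- ===== LEMMAS AND PROOFS =====

-- B's accumulated dict after folding the second pass over a record list
def pvSP (records : List (String × String)) : PySem.Dict String (List String) :=
  records.foldl pvStepSP PySem.Dict.empty

-- the simulation relation between A's loop state and B's first-pass state
def pvRel (a : PySem.Dict String (List String) × Option String)
    (b : List (String × String) × PySem.Dict String Nat × String) : Prop :=
  a.1 = pvSP b.1
  ∧ a.2.getD "" = b.2.2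
  ∧ (∀ t, b.2.1.contains t = a.1.contains t)
  ∧ (∀ t i, b.2.1.get? t = some i →
      (∃ v, b.1[i]? = some (t, v)) ∧ ∀ j, i < j → ∀ w, b.1[j]? = some w → w.1 ≠ t)

theorem pv_contains_stepSP (d : PySem.Dict String (List String)) (r : String × String)
    (t : String) : (pvStepSP d r).contains t = (t == r.1 || d.contains t) := by
  unfold pvStepSP
  split
  · simp [PySem.Dict.contains_modify, PySem.Dict.contains_setdefault]
  · simp [PySem.Dict.contains_insert]

theorem pv_insert_modify_self (d : PySem.Dict String (List String)) (k : String)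
    (v d0 : List String) (f : List String → List String) :
    (d.insert k v).modify k d0 f = d.insert k (f v) := by
  simp [PySem.Dict.modify, PySem.Dict.getD_insert_self, PySem.Dict.insert_insert_self]

theorem pv_setdefault_eq_ite (d : PySem.Dict String (List String)) (k : String)
    (v : List String) :
    d.setdefault k v = if d.contains k then d else d.insert k v := by
  by_cases h : d.contains k
  · simp [h, PySem.Dict.setdefault_of_contains d v h]
  · simp only [Bool.not_eq_true] at h
    simp [h, PySem.Dict.setdefault_of_not_contains d v h]

theorem pv_modLast_concat (x v : String) (l : List String) :
    pvModLast x (l ++ [v]) = l ++ [v ++ x] := by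
  simp [pvModLast]

theorem pv_stepSP_concat (d : PySem.Dict String (List String)) (t v x : String) :
    pvStepSP d (t, v ++ x) = (pvStepSP d (t, v)).modify t [] (pvModLast x) := by
  unfold pvStepSP
  by_cases hm : pvMulti.contains t
  · simp only [hm, if_pos]
    show (d.setdefault t []).insert t ((d.setdefault t []).getD t [] ++ [v ++ x])
       = ((d.setdefault t []).insert t ((d.setdefault t []).getD t [] ++ [v])).modify t [] (pvModLast x)
    rw [pv_insert_modify_self, pv_modLast_concat]
  · simp only [hm, Bool.false_eq_true, if_false]
    rw [pv_insert_modify_self]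
    have h0 : pvModLast x [v] = [v ++ x] := by simpa using pv_modLast_concat x v []
    rw [h0]

theorem pv_insert_insert_comm (d : PySem.Dict String (List String)) (t k : String)
    (a w : List String) (hc : d.contains t = true) (hne : k ≠ t) :
    (d.insert t a).insert k w = (d.insert k w).insert t a := by
  have hne' : t ≠ k := fun h => hne h.symm
  apply PySem.Dict.ext
  by_cases hk : d.contains k
  · have h1 : (d.insert t a).contains k = true := by
      simp [PySem.Dict.contains_insert, hk]
    have h2 : (d.insert k w).contains t = true := by
      simp [PySem.Dict.contains_insert, hc]
    rw [PySem.Dict.items_insert_of_contains _ _ h1, PySem.Dict.items_insert_of_contains _ _ hc,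
        PySem.Dict.items_insert_of_contains _ _ h2, PySem.Dict.items_insert_of_contains _ _ hk]
    simp only [List.map_map]
    apply List.map_congr_left
    intro p _
    simp only [Function.comp]
    by_cases hpt : p.1 = t
    · simp [hpt, hne']
    · by_cases hpk : p.1 = k
      · simp [hpk, hne]
      · simp [hpt, hpk]
  · have hk' : d.contains k = false := by simpa using hk
    have h1 : (d.insert t a).contains k = false := by
      simp [PySem.Dict.contains_insert, hk', hne]
    have h2 : (d.insert k w).contains t = true := by
      simp [PySem.Dict.contains_insert, hc]
    rw [PySem.Dict.items_insert_of_not_contains _ _ h1, PySem.Dict.items_insert_of_contains _ _ hc,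
        PySem.Dict.items_insert_of_contains _ _ h2, PySem.Dict.items_insert_of_not_contains _ _ hk']
    simp [hne]

theorem pv_insert_modify_comm (d : PySem.Dict String (List String)) (t k : String)
    (w : List String) (f : List String → List String)
    (hc : d.contains t = true) (hne : k ≠ t) :
    (d.modify t [] f).insert k w = (d.insert k w).modify t [] f := by
  have hg : (d.insert k w).getD t [] = d.getD t [] := PySem.Dict.getD_insert_of_ne d w [] (fun h => hne h.symm)
  show (d.insert t (f (d.getD t []))).insert k w = (d.insert k w).insert t (f ((d.insert k w).getD t []))
  rw [hg]
  exact pv_insert_insert_comm d t k (f (d.getD t [])) w hc hne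

theorem pv_setdefault_modify_comm (d : PySem.Dict String (List String)) (t k : String)
    (f : List String → List String) (hc : d.contains t = true) (hne : k ≠ t) :
    (d.modify t [] f).setdefault k [] = (d.setdefault k []).modify t [] f := by
  by_cases hk : d.contains k
  · have hk2 : (d.modify t [] f).contains k = true := by
      simp [PySem.Dict.contains_modify, hk]
    rw [PySem.Dict.setdefault_of_contains _ _ hk2, PySem.Dict.setdefault_of_contains _ _ hk]
  · have hk' : d.contains k = false := by simpa using hk
    have hk2 : (d.modify t [] f).contains k = false := by
      simp [PySem.Dict.contains_modify, hk', hne]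
    rw [PySem.Dict.setdefault_of_not_contains _ _ hk2, PySem.Dict.setdefault_of_not_contains _ _ hk']
    exact pv_insert_modify_comm d t k [] f hc hne

theorem pv_modify_modify_comm (d : PySem.Dict String (List String)) (t k : String)
    (d0 : List String) (f g : List String → List String)
    (hc : d.contains t = true) (hne : k ≠ t) :
    (d.modify t [] f).modify k d0 g = (d.modify k d0 g).modify t [] f := by
  have hg : (d.modify t [] f).getD k d0 = d.getD k d0 := PySem.Dict.getD_insert_of_ne d (f (d.getD t [])) d0 hne
  show (d.modify t [] f).insert k (g ((d.modify t [] f).getD k d0)) = (d.insert k (g (d.getD k d0))).modify t [] f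
  rw [hg]
  exact pv_insert_modify_comm d t k (g (d.getD k d0)) f hc hne

theorem pv_stepSP_modify_comm (d : PySem.Dict String (List String))
    (r : String × String) (t : String) (f : List String → List String)
    (hc : d.contains t = true) (hne : r.1 ≠ t) :
    pvStepSP (d.modify t [] f) r = (pvStepSP d r).modify t [] f := by
  unfold pvStepSP
  by_cases hm : pvMulti.contains r.1
  · simp only [hm, if_pos]
    have hc2 : (d.setdefault r.1 []).contains t = true := by
      simp [PySem.Dict.contains_setdefault, hc]
    rw [pv_setdefault_modify_comm d t r.1 f hc hne,
        pv_modify_modify_comm (d.setdefault r.1 []) t r.1 [] f (fun l => l ++ [r.2]) hc2 hne]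
  · simp only [hm, Bool.false_eq_true, if_false]
    exact pv_insert_modify_comm d t r.1 [r.2] f hc hne

theorem pv_foldl_modify_comm (suf : List (String × String))
    (d : PySem.Dict String (List String)) (t : String) (f : List String → List String)
    (hc : d.contains t = true) (hs : ∀ r ∈ suf, r.1 ≠ t) :
    suf.foldl pvStepSP (d.modify t [] f) = (suf.foldl pvStepSP d).modify t [] f := by
  induction suf generalizing d with
  | nil => rfl
  | cons r suf ih =>
    simp only [List.foldl_cons]
    rw [pv_stepSP_modify_comm d r t f hc (hs r (List.mem_cons_self))]
    exact ih (pvStepSP d r) (by rw [pv_contains_stepSP]; simp [hc]) (fun q hq => hs q (List.mem_cons_of_mem _ hq))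

theorem pv_SP_set (records : List (String × String)) (i : Nat) (t v x : String)
    (hi : records[i]? = some (t, v))
    (hlast : ∀ j, i < j → ∀ w, records[j]? = some w → w.1 ≠ t) :
    pvSP (records.set i (t, v ++ x)) = (pvSP records).modify t [] (pvModLast x) := by
  have hlen : i < records.length := by
    by_contra h
    rw [List.getElem?_eq_none_iff.2 (Nat.le_of_not_lt h)] at hi
    simp at hi
  have hival : records[i] = (t, v) := by
    have h2 := List.getElem?_eq_getElem hlen
    rw [h2] at hi
    injection hi
  have hrec : records = records.take i ++ (t, v) :: records.drop (i+1) := by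
    rw [← hival, List.getElem_cons_drop, List.take_append_drop]
  have hset : records.set i (t, v ++ x) = records.take i ++ (t, v ++ x) :: records.drop (i+1) :=
    List.set_eq_take_cons_drop _ hlen
  have hsuf : ∀ r ∈ records.drop (i+1), r.1 ≠ t := by
    intro r hr
    obtain ⟨k, hk⟩ := List.mem_iff_getElem?.1 hr
    rw [List.getElem?_drop] at hk
    exact hlast (i+1+k) (by omega) r hk
  unfold pvSP
  rw [hset]
  conv_rhs => rw [hrec]
  rw [List.foldl_append, List.foldl_append, List.foldl_cons, List.foldl_cons,
      pv_stepSP_concat]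
  exact pv_foldl_modify_comm _ _ t (pvModLast x)
    (by rw [pv_contains_stepSP]; simp) hsuf

theorem pv_step_rel (a : PySem.Dict String (List String) × Option String)
    (b : List (String × String) × PySem.Dict String Nat × String) (line : String)
    (h : pvRel a b) : pvRel (pvStepA a line) (pvStepB b line) := by
  obtain ⟨ad, ac⟩ := a
  obtain ⟨recs, li, bc⟩ := b
  obtain ⟨h1, h2, h3, h4⟩ := h
  simp only [pvRel] at h1 h2 h3 h4 ⊢
  unfold pvStepA pvStepB
  dsimp only
  by_cases hblank : PySem.Str.strip line = ""
  · rw [if_pos hblank, if_pos hblank]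
    exact ⟨h1, h2, h3, h4⟩
  · rw [if_neg hblank, if_neg hblank]
    by_cases hsw : PySem.Str.startswith line " " = true
    · rw [if_pos hsw, if_pos hsw]
      cases ac with
      | none =>
        dsimp only
        have hbc : bc = "" := by simpa using h2.symm
        subst hbc
        rw [if_neg (by simp)]
        exact ⟨h1, h2, h3, h4⟩
      | some t =>
        dsimp only
        have hbc : bc = t := by simpa using h2.symm
        subst hbc
        by_cases hg : bc ≠ "" ∧ ad.contains bc = true
        · have hg' : bc ≠ "" ∧ li.contains bc = true := ⟨hg.1, by rw [h3]; exact hg.2⟩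
          rw [if_pos hg, if_pos hg']
          have hisome : (li.get? bc).isSome := by
            rw [← PySem.Dict.contains_eq_isSome_get?]; exact hg'.2
          obtain ⟨i, hi⟩ := Option.isSome_iff_exists.1 hisome
          simp only [hi]
          obtain ⟨⟨v, hv⟩, hlast⟩ := h4 bc i hi
          have hgetD : recs.getD i ("", "") = (bc, v) := by
            rw [List.getD_eq_getElem?_getD, hv]; rfl
          rw [hgetD]
          have hilen : i < recs.length := by
            by_contra hc
            rw [List.getElem?_eq_none_iff.2 (Nat.le_of_not_lt hc)] at hv
            simp at hv
          have c1 : ad.modify bc [] (pvModLast (" " ++ PySem.Str.strip line))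
              = pvSP (recs.set i ((bc, v).1, (bc, v).2 ++ " " ++ PySem.Str.strip line)) := by
            rw [h1]
            have hassoc : (bc, v).2 ++ " " ++ PySem.Str.strip line
                = v ++ (" " ++ PySem.Str.strip line) := String.append_assoc
            rw [hassoc]
            exact (pv_SP_set recs i bc v (" " ++ PySem.Str.strip line) hv hlast).symm
          have c3 : ∀ x, li.contains x
              = (ad.modify bc [] (pvModLast (" " ++ PySem.Str.strip line))).contains x := by
            intro x
            rw [h3, PySem.Dict.contains_modify]
            by_cases hx : x = bc
            · subst hx; simp [hg.2]
            · simp [hx]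
          have c4 : ∀ x k, li.get? x = some k →
              (∃ w, (recs.set i ((bc, v).1, (bc, v).2 ++ " " ++ PySem.Str.strip line))[k]? = some (x, w))
              ∧ ∀ j, k < j → ∀ w',
                (recs.set i ((bc, v).1, (bc, v).2 ++ " " ++ PySem.Str.strip line))[j]? = some w' → w'.1 ≠ x := by
            intro x k hk
            obtain ⟨⟨w, hw⟩, hlx⟩ := h4 x k hk
            constructor
            · by_cases hik : i = k
              · subst hik
                rw [hv] at hw
                have hxbc : x = bc := by
                  have := congrArg (fun o => (o.getD ("", "")).1) hw
                  simpa using this.symm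
                subst hxbc
                exact ⟨v ++ " " ++ PySem.Str.strip line, by rw [List.getElem?_set, if_pos rfl, if_pos hilen]⟩
              · exact ⟨w, by rw [List.getElem?_set, if_neg hik]; exact hw⟩
            · intro j hj w' hw'
              rw [List.getElem?_set] at hw'
              by_cases hij : i = j
              · subst hij
                rw [if_pos rfl, if_pos hilen] at hw'
                have hwt : w' = ((bc, v).1, (bc, v).2 ++ " " ++ PySem.Str.strip line) := by
                  injection hw' with hq
                  exact hq.symm
                rw [hwt]
                simpa using hlx i hj (bc, v) hv
              · rw [if_neg hij] at hw'
                exact hlx j hj w' hw'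
          exact ⟨c1, h2, c3, c4⟩
        · have hg' : ¬ (bc ≠ "" ∧ li.contains bc = true) := by
            intro hc; exact hg ⟨hc.1, by rw [← h3]; exact hc.2⟩
          rw [if_neg hg, if_neg hg']
          exact ⟨h1, h2, h3, h4⟩
    · rw [if_neg hsw, if_neg hsw]
      have htv : (if PySem.Str.isIn ": " line = false then (line, "")
          else
            match PySem.Str.splitMax? line ": " 1 with
            | some (tag :: value :: _) => (PySem.Str.strip tag, PySem.Str.strip value)
            | _ => (line, "")) = parse_tag_value line := rfl
      rw [htv]
      by_cases hval : (parse_tag_value line).2 = ""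
      · rw [if_pos hval, if_pos hval]
        exact ⟨h1, rfl, h3, h4⟩
      · rw [if_neg hval, if_neg hval]
        set tag := (parse_tag_value line).1
        set val := (parse_tag_value line).2
        have hstep : (if pvMulti.contains tag = true then
              ((if ad.contains tag = true then ad else ad.insert tag []).modify tag []
                (fun l => l ++ [val]), some tag)
            else (ad.insert tag [val], some tag))
            = (pvStepSP ad (tag, val), some tag) := by
          unfold pvStepSP
          by_cases hm : pvMulti.contains tag = true
          · rw [if_pos hm, if_pos hm, pv_setdefault_eq_ite]
          · rw [if_neg hm, if_neg hm]
        rw [hstep]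
        have hSP : pvSP (recs ++ [(tag, val)]) = pvStepSP (pvSP recs) (tag, val) := by
          unfold pvSP
          rw [List.foldl_append, List.foldl_cons, List.foldl_nil]
        have c1 : pvStepSP ad (tag, val) = pvSP (recs ++ [(tag, val)]) := by
          rw [hSP, h1]
        have c3 : ∀ x, (li.insert tag recs.length).contains x
            = (pvStepSP ad (tag, val)).contains x := by
          intro x
          rw [PySem.Dict.contains_insert, pv_contains_stepSP, h3]
        have c4 : ∀ x k, (li.insert tag recs.length).get? x = some k →
            (∃ w, (recs ++ [(tag, val)])[k]? = some (x, w))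
            ∧ ∀ j, k < j → ∀ w', (recs ++ [(tag, val)])[j]? = some w' → w'.1 ≠ x := by
          intro x k hk
          rw [PySem.Dict.get?_insert] at hk
          by_cases hx : x = tag
          · rw [if_pos hx] at hk
            have hkl : k = recs.length := by injection hk with h'; omega
            subst hkl hx
            refine ⟨⟨val, List.getElem?_concat_length⟩, ?_⟩
            intro j hj w' hw'
            have : j < recs.length + 1 := by
              by_contra hc
              rw [List.getElem?_eq_none_iff.2 (by simpa using Nat.le_of_not_lt hc)] at hw'
              simp at hw'
            omega
          · rw [if_neg hx] at hk
            obtain ⟨⟨w, hw⟩, hlx⟩ := h4 x k hk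
            have hkl : k < recs.length := by
              by_contra hc
              rw [List.getElem?_eq_none_iff.2 (Nat.le_of_not_lt hc)] at hw
              simp at hw
            refine ⟨⟨w, by rw [List.getElem?_append_left hkl]; exact hw⟩, ?_⟩
            intro j hj w' hw'
            by_cases hjl : j < recs.length
            · rw [List.getElem?_append_left hjl] at hw'
              exact hlx j hj w' hw'
            · have hjeq : j = recs.length := by
                have hlen2 : j < (recs ++ [(tag, val)]).length := by
                  by_contra hc2
                  rw [List.getElem?_eq_none_iff.2 (Nat.le_of_not_lt hc2)] at hw'
                  simp at hw'
                simp only [List.length_append, List.length_cons, List.length_nil] at hlen2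
                omega
              subst hjeq
              rw [List.getElem?_concat_length] at hw'
              have : w' = (tag, val) := by injection hw' with hq; exact hq.symm
              rw [this]
              exact fun hcon => hx (hcon.symm)
        exact ⟨c1, rfl, c3, c4⟩

theorem pv_foldl_rel (rest : List String)
    (a : PySem.Dict String (List String) × Option String)
    (b : List (String × String) × PySem.Dict String Nat × String)
    (h : pvRel a b) : pvRel (rest.foldl pvStepA a) (rest.foldl pvStepB b) := by
  induction rest generalizing a b with
  | nil => exact h
  | cons l rest ih => exact ih _ _ (pv_step_rel a b l h)

theorem pv_rel_init : pvRel (PySem.Dict.empty, none) ([], PySem.Dict.empty, "") := by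
  refine ⟨rfl, rfl, fun t => rfl, fun t i h => by simp [PySem.Dict.get?_empty] at h⟩

-- ===== VERDICT (by name: the statement is the Claim_ definition above) =====
theorem parse_term_block_spec : Claim_equal_parse_term_block := by
  intro lines _
  unfold Spec_parse_term_block parse_term_block parse_term_block_alt
  match lines with
  | [] => rfl
  | first :: rest =>
    have h := pv_foldl_rel rest (PySem.Dict.empty, none) ([], PySem.Dict.empty, "") pv_rel_init
    simp only []
    split
    · exact congrArg some (congrArg PySem.Dict.items h.1)
    · rfl
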